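-- pv_equiv track=rewrite | github.com/ardiya/cpp_ros_jupyter_notebook | generate_cling_3rd_party.py | split_cling_flags
-- ===== SOURCE A (Python) =====
-- from typing import List, Tuple
--
-- def split_cling_flags(flags: List[str])->Tuple[List[str], List[str], List[str]]:
--     include_paths = list()
--     library_paths = list()
--     libraries = list()
--
--     for flag in flags:
--         if flag.startswith("-I"):
--             include_paths.append(flag[2:])
--         elif flag.startswith("-L"):
--             library_paths.append(flag[2:])
--         elif flag.startswith("-l"):
--             libraries.append(flag[2:])
--         else:
--             libraries.append(flag)
--
--     return include_paths, library_paths, libraries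
-- ===== SOURCE B (Python) =====
-- from typing import List, Tuple
--
-- def split_cling_flags(flags: List[str]) -> Tuple[List[str], List[str], List[str]]:
--     include_paths = [f[2:] for f in flags if f.startswith("-I")]
--     library_paths = [f[2:] for f in flags if f.startswith("-L")]
--     libraries = [f[2:] if f.startswith("-l") else f
--                  for f in flags if not f.startswith(("-I", "-L"))]
--     return include_paths, library_paths, libraries
-- ===== Notes on version B (the rewrite author's own statement) =====
-- stated objective: idiomatic
-- what changed: Replaced the single categorizing loop with mutable accumulators by three independent comprehension passes, one per category.
import Mathlib
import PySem

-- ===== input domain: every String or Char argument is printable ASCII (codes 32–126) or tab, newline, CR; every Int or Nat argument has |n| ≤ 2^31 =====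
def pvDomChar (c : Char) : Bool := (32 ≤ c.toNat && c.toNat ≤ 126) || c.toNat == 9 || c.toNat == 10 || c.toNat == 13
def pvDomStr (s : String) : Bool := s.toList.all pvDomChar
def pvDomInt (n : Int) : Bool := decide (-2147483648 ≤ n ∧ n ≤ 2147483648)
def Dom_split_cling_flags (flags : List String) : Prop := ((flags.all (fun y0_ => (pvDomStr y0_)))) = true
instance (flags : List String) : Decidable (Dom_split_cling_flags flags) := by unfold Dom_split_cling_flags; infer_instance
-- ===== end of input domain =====

-- B replaces A's single categorizing loop by three independent comprehension passes (idiomatic decomposition, same cost).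

-- ===== PORT A =====
-- A: one loop over flags, appending each flag's payload to one of three accumulators.
def split_cling_flags (flags : List String) : List String × List String × List String :=
  flags.foldl
    (fun (st : List String × List String × List String) flag =>
      if PySem.Str.startswith flag "-I" then
        (st.1 ++ [PySem.Str.slice flag (some 2) none], st.2.1, st.2.2)
      else if PySem.Str.startswith flag "-L" then
        (st.1, st.2.1 ++ [PySem.Str.slice flag (some 2) none], st.2.2)
      else if PySem.Str.startswith flag "-l" then
        (st.1, st.2.1, st.2.2 ++ [PySem.Str.slice flag (some 2) none])
      else
        (st.1, st.2.1, st.2.2 ++ [flag]))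
    ([], [], [])

-- ===== PORT B =====
-- B: three comprehensions, each a filterMap pass over flags.
def split_cling_flags_alt (flags : List String) : List String × List String × List String :=
  (flags.filterMap (fun f =>
      if PySem.Str.startswith f "-I" then some (PySem.Str.slice f (some 2) none) else none),
   flags.filterMap (fun f =>
      if PySem.Str.startswith f "-L" then some (PySem.Str.slice f (some 2) none) else none),
   flags.filterMap (fun f =>
      if PySem.Str.startswith f "-I" || PySem.Str.startswith f "-L" then none
      else some (if PySem.Str.startswith f "-l" then PySem.Str.slice f (some 2) none else f)))

-- ===== PRECONDITION & SPEC =====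
def Spec_split_cling_flags (flags : List String) (out : List String × List String × List String) : Prop := out = split_cling_flags_alt flags
instance (flags : List String) (out : List String × List String × List String) : Decidable (Spec_split_cling_flags flags out) := by unfold Spec_split_cling_flags; infer_instance

-- ===== CLAIM (what is proved, stated in full; the proofs are below) =====
def Claim_equal_split_cling_flags : Prop := ∀ (flags : List String), Dom_split_cling_flags flags → Spec_split_cling_flags flags (split_cling_flags flags)

-- ===== LEMMAS AND PROOFS =====
theorem pvSwExcl (l : List Char) (c d : Char) (hcd : c ≠ d)
    (h : PySem.Chars.startswith l ['-', c] = true) :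
    PySem.Chars.startswith l ['-', d] = false := by
  rw [PySem.Chars.startswith_iff] at h
  obtain ⟨u, rfl⟩ := h
  cases hd : PySem.Chars.startswith (['-', c] ++ u) ['-', d] with
  | false => rfl
  | true =>
    exfalso
    rw [PySem.Chars.startswith_iff] at hd
    obtain ⟨v, hv⟩ := hd
    simp only [List.cons_append, List.nil_append, List.cons.injEq] at hv
    exact hcd hv.2.1.symm

theorem split_cling_foldl_acc (flags : List String)
    (a b c : List String) :
    flags.foldl
      (fun (st : List String × List String × List String) flag =>
        if PySem.Str.startswith flag "-I" then
          (st.1 ++ [PySem.Str.slice flag (some 2) none], st.2.1, st.2.2)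
        else if PySem.Str.startswith flag "-L" then
          (st.1, st.2.1 ++ [PySem.Str.slice flag (some 2) none], st.2.2)
        else if PySem.Str.startswith flag "-l" then
          (st.1, st.2.1, st.2.2 ++ [PySem.Str.slice flag (some 2) none])
        else
          (st.1, st.2.1, st.2.2 ++ [flag]))
      (a, b, c)
    = (a ++ (split_cling_flags_alt flags).1,
       b ++ (split_cling_flags_alt flags).2.1,
       c ++ (split_cling_flags_alt flags).2.2) := by
  induction flags generalizing a b c with
  | nil => simp [split_cling_flags_alt]
  | cons f fs ih =>
    simp only [List.foldl_cons]
    have bI : ∀ s : String, PySem.Str.startswith s "-I" = PySem.Chars.startswith s.toList ['-', 'I'] := fun _ => rfl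
    have bL : ∀ s : String, PySem.Str.startswith s "-L" = PySem.Chars.startswith s.toList ['-', 'L'] := fun _ => rfl
    have bl : ∀ s : String, PySem.Str.startswith s "-l" = PySem.Chars.startswith s.toList ['-', 'l'] := fun _ => rfl
    by_cases hI : PySem.Str.startswith f "-I" = true
    · have hfL := pvSwExcl f.toList 'I' 'L' (by decide) (bI f ▸ hI)
      simp only [hI, if_pos]
      rw [ih]
      simp [split_cling_flags_alt, bI f ▸ hI, hfL]
    · by_cases hL : PySem.Str.startswith f "-L" = true
      · have hfI := pvSwExcl f.toList 'L' 'I' (by decide) (bL f ▸ hL)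
        simp only [hI, hL, if_pos, if_neg, Bool.not_eq_true]
        rw [ih]
        simp [split_cling_flags_alt, hfI, bL f ▸ hL]
      · by_cases hl : PySem.Str.startswith f "-l" = true
        · have hfI := pvSwExcl f.toList 'l' 'I' (by decide) (bl f ▸ hl)
          have hfL := pvSwExcl f.toList 'l' 'L' (by decide) (bl f ▸ hl)
          simp only [hI, hL, hl, if_pos, if_neg, Bool.not_eq_true]
          rw [ih]
          simp [split_cling_flags_alt, hfI, hfL, bl f ▸ hl]
        · have hfI : PySem.Chars.startswith f.toList ['-', 'I'] = false := by
            rw [← bI f]; exact Bool.not_eq_true _ ▸ (by simpa using hI)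
          have hfL : PySem.Chars.startswith f.toList ['-', 'L'] = false := by
            rw [← bL f]; exact Bool.not_eq_true _ ▸ (by simpa using hL)
          have hfl : PySem.Chars.startswith f.toList ['-', 'l'] = false := by
            rw [← bl f]; exact Bool.not_eq_true _ ▸ (by simpa using hl)
          simp only [hI, hL, hl, if_neg, Bool.not_eq_true]
          rw [ih]
          simp [split_cling_flags_alt, hfI, hfL, hfl]

-- ===== VERDICT (by name: the statement is the Claim_ definition above) =====
theorem split_cling_flags_spec : Claim_equal_split_cling_flags := by
  intro flags _
  unfold Spec_split_cling_flags split_cling_flags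
  rw [split_cling_foldl_acc]
  simp
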